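-- pv_equiv track=rewrite | github.com/vivek-23/ConciseAlgoList | SudokuSolver.py | isCellClear
-- ===== SOURCE A (Python) =====
-- def isCellClear(matrix, ii, jj, k):
--   sset = set()
--   rStart = ii // 3 * 3
--   cStart = jj // 3 * 3
--   for i in range(rStart, rStart + 3):
--     for j in range(cStart, cStart + 3):
--       if matrix[i][j] != '.':
--         if matrix[i][j] in sset:
--           return False
--         sset.add(matrix[i][j])
--   return True
-- ===== SOURCE B (Python) =====
-- def isCellClear(matrix, ii, jj, k):
--   rStart = ii // 3 * 3
--   cStart = jj // 3 * 3
--   vals = sorted(matrix[rStart + i][cStart + j]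
--                 for i in range(3) for j in range(3)
--                 if matrix[rStart + i][cStart + j] != '.')
--   return all(a != b for a, b in zip(vals, vals[1:]))
-- ===== Notes on version B (the rewrite author's own statement) =====
-- stated objective: alternative
-- what changed: B detects duplicates by sort-then-adjacent-scan: it gathers the box's non-'.' values, sorts them, and checks that no two adjacent sorted values are equal, instead of A's running set with a per-element membership test and early return.
-- outside the precondition, e.g. on isCellClear([['1', '1', '.']], 0, 0, 1): A returns False, B raises IndexError
import Mathlib
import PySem

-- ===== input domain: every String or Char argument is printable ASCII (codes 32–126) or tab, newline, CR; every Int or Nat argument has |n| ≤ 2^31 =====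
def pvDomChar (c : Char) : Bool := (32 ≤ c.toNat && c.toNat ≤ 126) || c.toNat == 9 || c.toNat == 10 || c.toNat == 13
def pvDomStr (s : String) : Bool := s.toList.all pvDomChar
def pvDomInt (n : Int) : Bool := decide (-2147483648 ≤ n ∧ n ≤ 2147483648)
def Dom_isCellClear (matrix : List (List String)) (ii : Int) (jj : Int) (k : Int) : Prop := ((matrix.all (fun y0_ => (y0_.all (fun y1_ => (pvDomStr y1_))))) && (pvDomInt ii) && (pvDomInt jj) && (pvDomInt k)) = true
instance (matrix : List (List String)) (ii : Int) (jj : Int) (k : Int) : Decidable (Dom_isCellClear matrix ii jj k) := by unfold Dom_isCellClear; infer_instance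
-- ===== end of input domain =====

-- B replaces A's running set with early exit by sort-then-adjacent-scan: gather the box's
-- non-'.' values, sort them, and check no two adjacent sorted values are equal
-- (objective: alternative algorithm, same cost on the fixed-size box).

-- ===== PORT A =====
-- A's nested for-loops with early 'return False', as a recursion over the (i, j) cell list
-- carrying the running set sset. pyGetD's default is never reached under Pre_.
def isCellClearGo (matrix : List (List String)) (cells : List (Int × Int))
    (sset : PySem.Set String) : Bool :=
  match cells with
  | [] => true
  | (i, j) :: rest =>
      let v := PySem.List.pyGetD (PySem.List.pyGetD matrix i []) j "."
      if v ≠ "." then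
        if PySem.Set.contains sset v then false
        else isCellClearGo matrix rest (PySem.Set.add sset v)
      else isCellClearGo matrix rest sset

def isCellClear (matrix : List (List String)) (ii : Int) (jj : Int) (k : Int) : Bool :=
  let rStart := PySem.Int.floordiv ii 3 * 3
  let cStart := PySem.Int.floordiv jj 3 * 3
  isCellClearGo matrix
    ((PySem.List.pyRange rStart (rStart + 3) 1).flatMap
      (fun i => (PySem.List.pyRange cStart (cStart + 3) 1).map (fun j => (i, j))))
    PySem.Set.empty

-- ===== PORT B =====
def isCellClear_alt (matrix : List (List String)) (ii : Int) (jj : Int) (k : Int) : Bool :=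
  let rStart := PySem.Int.floordiv ii 3 * 3
  let cStart := PySem.Int.floordiv jj 3 * 3
  let vals := PySem.List.sorted
    (((PySem.List.pyRange 0 3 1).flatMap
        (fun i => (PySem.List.pyRange 0 3 1).map
          (fun j => PySem.List.pyGetD (PySem.List.pyGetD matrix (rStart + i) []) (cStart + j) "."))).filter
      (fun v => v ≠ "."))
    (fun x => x) false
  (vals.zip vals.tail).all (fun p => p.1 != p.2)

-- ===== PRECONDITION & SPEC =====
-- Pre_: every one of the 9 box accesses matrix[i][j] is a valid Python index (negative
-- wraparound allowed); outside it A raises IndexError — except that A may still return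
-- False early when it meets a duplicate before the first out-of-range access (see cites).
def Pre_isCellClear (matrix : List (List String)) (ii : Int) (jj : Int) (k : Int) : Prop :=
  ∀ i ∈ PySem.List.pyRange (PySem.Int.floordiv ii 3 * 3) (PySem.Int.floordiv ii 3 * 3 + 3) 1,
    PySem.Raise.InRange matrix.length i ∧
    ∀ j ∈ PySem.List.pyRange (PySem.Int.floordiv jj 3 * 3) (PySem.Int.floordiv jj 3 * 3 + 3) 1,
      PySem.Raise.InRange (PySem.List.pyGetD matrix i []).length j

instance (matrix : List (List String)) (ii : Int) (jj : Int) (k : Int) : Decidable (Pre_isCellClear matrix ii jj k) := by unfold Pre_isCellClear; infer_instance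

def pvWitness_isCellClear : List (List String) × Int × Int × Int :=
  ([["1", "2", "."], [".", "5", "6"], ["7", ".", "9"]], 1, 2, 4)

def Spec_isCellClear (matrix : List (List String)) (ii : Int) (jj : Int) (k : Int) (out : Bool) : Prop := out = isCellClear_alt matrix ii jj k
instance (matrix : List (List String)) (ii : Int) (jj : Int) (k : Int) (out : Bool) : Decidable (Spec_isCellClear matrix ii jj k out) := by unfold Spec_isCellClear; infer_instance

-- ===== CLAIM (what is proved, stated in full; the proofs are below) =====
def Claim_equal_isCellClear : Prop := ∀ (matrix : List (List String)) (ii : Int) (jj : Int) (k : Int), Dom_isCellClear matrix ii jj k → Pre_isCellClear matrix ii jj k → Spec_isCellClear matrix ii jj k (isCellClear matrix ii jj k)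

-- ===== LEMMAS AND PROOFS =====

-- A's loop over a plain value list (cells abstracted away).
def loopV (vs : List String) (sset : PySem.Set String) : Bool :=
  match vs with
  | [] => true
  | v :: rest =>
      if v ≠ "." then
        if PySem.Set.contains sset v then false
        else loopV rest (PySem.Set.add sset v)
      else loopV rest sset

theorem isCellClearGo_eq_loopV (matrix : List (List String)) (cells : List (Int × Int))
    (s : PySem.Set String) :
    isCellClearGo matrix cells s
      = loopV (cells.map (fun c => PySem.List.pyGetD (PySem.List.pyGetD matrix c.1 []) c.2 ".")) s := by
  induction cells generalizing s with
  | nil => rfl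
  | cons c rest ih =>
      obtain ⟨i, j⟩ := c
      simp only [isCellClearGo, loopV, List.map_cons]
      split_ifs <;> simp [ih]

theorem loopV_iff (vs : List String) (s : PySem.Set String) :
    loopV vs s = true ↔
      (vs.filter (fun v => v ≠ ".")).Nodup ∧ ∀ v ∈ vs.filter (fun v => v ≠ "."), v ∉ s := by
  induction vs generalizing s with
  | nil => simp [loopV]
  | cons v rest ih =>
      by_cases hv : v = "."
      · simp [loopV, hv, ih]
      · have hfc : (v :: rest).filter (fun v => v ≠ ".") = v :: rest.filter (fun v => v ≠ ".") := by
          simp [hv]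
        rw [hfc]
        simp only [loopV]
        rw [if_pos hv]
        by_cases hs : v ∈ s
        · rw [if_pos ((PySem.Set.contains_iff s v).2 hs)]
          constructor
          · intro h; exact absurd h (by simp)
          · rintro ⟨_, hmem⟩
            exact absurd hs (hmem v (List.mem_cons_self))
        · rw [if_neg (fun h => hs ((PySem.Set.contains_iff s v).1 h)), ih]
          constructor
          · rintro ⟨hnd, hmem⟩
            have hvnot : v ∉ rest.filter (fun v => v ≠ ".") := by
              intro hm
              exact absurd ((PySem.Set.mem_add s v v).2 (Or.inr rfl)) (hmem v hm)
            refine ⟨List.Nodup.cons hvnot hnd, ?_⟩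
            intro u hu
            rcases List.mem_cons.1 hu with rfl | hu
            · exact hs
            · intro hus
              exact hmem u hu ((PySem.Set.mem_add s v u).2 (Or.inl hus))
          · rintro ⟨hnd, hmem⟩
            rcases List.nodup_cons.1 hnd with ⟨hvnot, hnd'⟩
            refine ⟨hnd', ?_⟩
            intro u hu hua
            rcases (PySem.Set.mem_add s v u).1 hua with hus | rfl
            · exact hmem u (List.mem_cons_of_mem _ hu) hus
            · exact hvnot hu

-- On a ≤-sorted list, "no two adjacent elements equal" is exactly Nodup.
theorem adjAll_ne_iff_nodup {α : Type} [LinearOrder α] [DecidableEq α] (l : List α)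
    (h : l.Pairwise (· ≤ ·)) :
    ((l.zip l.tail).all (fun p => p.1 != p.2) = true) ↔ l.Nodup := by
  induction l with
  | nil => simp
  | cons a t ih =>
      cases t with
      | nil => simp
      | cons b t' =>
          rcases List.pairwise_cons.1 h with ⟨hab, ht⟩
          have hrec := ih ht
          simp only [List.tail_cons, List.zip_cons_cons, List.all_cons] at hrec ⊢
          rw [Bool.and_eq_true, hrec, bne_iff_ne]
          constructor
          · rintro ⟨hne, hnd⟩
            refine List.nodup_cons.2 ⟨?_, hnd⟩
            intro hmem
            rcases List.mem_cons.1 hmem with rfl | hmem'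
            · exact hne rfl
            · have hleb : b ≤ a := (List.pairwise_cons.1 ht).1 a hmem'
              have hab' : a ≤ b := hab b List.mem_cons_self
              exact hne (le_antisymm hab' hleb)
          · intro hnd
            rcases List.nodup_cons.1 hnd with ⟨hnot, hnd'⟩
            exact ⟨fun he => hnot (he ▸ List.mem_cons_self), hnd'⟩

-- ===== VERDICT (by name: the statement is the Claim_ definition above) =====
theorem isCellClear_spec : Claim_equal_isCellClear := by
  intro matrix ii jj k _hdom _hpre
  unfold Spec_isCellClear isCellClear isCellClear_alt
  set r := PySem.Int.floordiv ii 3 * 3 with hr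
  set c := PySem.Int.floordiv jj 3 * 3 with hc
  have h3 : ∀ a : Int, PySem.List.pyRange a (a + 3) 1 = [a, a + 1, a + 2] := by
    intro a
    rw [PySem.List.pyRange_one_cons (by omega), PySem.List.pyRange_one_cons (by omega),
        PySem.List.pyRange_one_cons (by omega), PySem.List.pyRange_one_eq_nil (by omega)]
    norm_num
    omega
  have h03 : PySem.List.pyRange (0 : Int) 3 1 = [0, 1, 2] := by
    have := h3 0
    norm_num at this
    exact this
  rw [isCellClearGo_eq_loopV]
  have hvals :
      ((PySem.List.pyRange r (r + 3) 1).flatMap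
          (fun i => (PySem.List.pyRange c (c + 3) 1).map (fun j => (i, j)))).map
        (fun cell => PySem.List.pyGetD (PySem.List.pyGetD matrix cell.1 []) cell.2 ".")
      = (PySem.List.pyRange (0 : Int) 3 1).flatMap
          (fun i => (PySem.List.pyRange (0 : Int) 3 1).map
            (fun j => PySem.List.pyGetD (PySem.List.pyGetD matrix (r + i) []) (c + j) ".")) := by
    rw [h3 r, h3 c, h03]
    simp only [List.flatMap_cons, List.flatMap_nil, List.map_cons, List.map_nil,
      List.map_append, List.append_nil]
    norm_num
  rw [hvals]
  set raw :=
    (PySem.List.pyRange (0 : Int) 3 1).flatMap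
      (fun i => (PySem.List.pyRange (0 : Int) 3 1).map
        (fun j => PySem.List.pyGetD (PySem.List.pyGetD matrix (r + i) []) (c + j) "."))
    with hraw
  set vals := PySem.List.sorted (raw.filter (fun v => v ≠ ".")) (fun x => x) false with hvdef
  have hperm : vals.Perm (raw.filter (fun v => v ≠ ".")) :=
    PySem.List.sorted_perm _ _ _
  have hpw : vals.Pairwise (· ≤ ·) := by
    have := PySem.List.sorted_pairwise (xs := raw.filter (fun v => v ≠ ".")) (key := fun x => x)
    simpa [hvdef] using this
  have hB : ((vals.zip vals.tail).all (fun p => p.1 != p.2) = true)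
      ↔ (raw.filter (fun v => v ≠ ".")).Nodup := by
    rw [adjAll_ne_iff_nodup vals hpw]
    exact hperm.nodup_iff
  have hA : (loopV raw PySem.Set.empty = true) ↔ (raw.filter (fun v => v ≠ ".")).Nodup := by
    rw [loopV_iff]
    constructor
    · rintro ⟨hnd, _⟩; exact hnd
    · intro hnd; exact ⟨hnd, by intro v _ h; simp [PySem.Set.empty] at h⟩
  exact Bool.eq_iff_iff.2 (hA.trans hB.symm)
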